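-- pv_equiv track=rewrite | github.com/Fapacus/Harjoitustyo_tiralabra_ristinolla | src/conversions.py | col_to_string
-- ===== SOURCE A (Python) =====
-- def col_to_string(board):
--     """
--     Converts the board into a list of strings representing columns.
--
--     Args:
--         board: The current board.
--
--     Returns:
--         A list of strings representing columns.
--     """
--     col_list = []
--     n = len(board)
--
--     for i in range(n):
--         col = []
--         for row in board:
--             col.append(row[i])
--         col_string = ''.join(col)
--         col_list.append(col_string)
--
--     return col_list
-- ===== SOURCE B (Python) =====
-- def col_to_string(board):
--     """Row-major rebuild: keep n running column strings and extend each one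
--     while scanning the board a row at a time (instead of A's column-at-a-time
--     nested loops)."""
--     n = len(board)
--     cols = [''] * n
--     for row in board:
--         cols = [c + row[i] for i, c in enumerate(cols)]
--     return cols
-- ===== Notes on version B (the rewrite author's own statement) =====
-- stated objective: alternative
-- what changed: A builds each column string with a column-major nested loop (for each index i, scan all rows and join); B flips the traversal to row-major, maintaining n running column accumulators and extending every one of them per row via enumerate.
import Mathlib
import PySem

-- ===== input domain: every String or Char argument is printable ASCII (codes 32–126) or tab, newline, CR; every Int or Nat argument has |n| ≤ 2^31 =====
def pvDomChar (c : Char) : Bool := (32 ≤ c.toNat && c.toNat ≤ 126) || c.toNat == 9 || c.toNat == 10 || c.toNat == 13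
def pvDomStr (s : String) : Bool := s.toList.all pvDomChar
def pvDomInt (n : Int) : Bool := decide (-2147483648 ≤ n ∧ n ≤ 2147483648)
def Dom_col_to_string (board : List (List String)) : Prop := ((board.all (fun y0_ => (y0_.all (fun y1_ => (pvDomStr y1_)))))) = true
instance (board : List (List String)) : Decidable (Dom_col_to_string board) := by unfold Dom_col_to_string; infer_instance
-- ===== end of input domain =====

-- B rebuilds the columns row-by-row (n running accumulators) instead of A's
-- column-at-a-time nested loops; same cost, different traversal (objective: alternative).

-- ===== PORT A =====
-- row[i] is PySem.List.pyGet?; the .getD "" default is unreachable under Pre_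
-- (Python raises IndexError exactly there, and Pre_ excludes those boards).
def col_to_string (board : List (List String)) : List String :=
  (PySem.List.pyRange 0 (board.length : Int) 1).foldl
    (fun colList i =>
      let col := board.foldl (fun c row => c ++ [(PySem.List.pyGet? row i).getD ""]) []
      colList ++ [PySem.Str.join "" col])
    []

-- ===== PORT B =====
-- same .getD "" convention for row[i]; unreachable under Pre_.
def col_to_string_alt (board : List (List String)) : List String :=
  board.foldl
    (fun cols row =>
      (PySem.List.enumerate cols).map (fun ic => ic.2 ++ (PySem.List.pyGet? row ic.1).getD ""))
    (List.replicate board.length "")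

-- ===== PRECONDITION & SPEC =====
-- Pre_ excludes exactly the boards on which Python A raises IndexError:
-- some row shorter than the number of rows (ragged / wide-short boards).
def Pre_col_to_string (board : List (List String)) : Prop :=
  ∀ row ∈ board, board.length ≤ row.length
instance (board : List (List String)) : Decidable (Pre_col_to_string board) := by
  unfold Pre_col_to_string; infer_instance

def pvWitness_col_to_string : List (List String) := [["x", "y"], ["a", "b"]]

def Spec_col_to_string (board : List (List String)) (out : List String) : Prop := out = col_to_string_alt board
instance (board : List (List String)) (out : List String) : Decidable (Spec_col_to_string board out) := by unfold Spec_col_to_string; infer_instance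

-- ===== CLAIM (what is proved, stated in full; the proofs are below) =====
def Claim_equal_col_to_string : Prop := ∀ (board : List (List String)), Dom_col_to_string board → Pre_col_to_string board → Spec_col_to_string board (col_to_string board)

-- ===== LEMMAS AND PROOFS =====

-- row[i] with default, as both ports use it
def pvGet (row : List String) (i : Int) : String := (PySem.List.pyGet? row i).getD ""

-- ''-join of a cons is append
theorem pv_join0_cons (s : String) (l : List String) :
    PySem.Str.join "" (s :: l) = s ++ PySem.Str.join "" l := by
  apply String.toList_inj.mp
  cases l with
  | nil => simp [PySem.Chars.join_singleton, PySem.Chars.join_nil]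
  | cons b t => simp [PySem.Chars.join_cons_cons]

-- A in closed form
theorem pvA_closed (board : List (List String)) :
    col_to_string board
      = (PySem.List.pyRange 0 (board.length : Int) 1).map
          (fun i => PySem.Str.join "" (board.map (fun row => pvGet row i))) := by
  unfold col_to_string pvGet
  simp only [PySem.List.foldl_append_singleton_eq_map, List.nil_append]

-- B's loop invariant
theorem pvB_inv (rows : List (List String)) (n : Nat) (f : Int → String) :
    rows.foldl
      (fun cols row =>
        (PySem.List.enumerate cols).map (fun ic => ic.2 ++ (PySem.List.pyGet? row ic.1).getD ""))
      ((PySem.List.pyRange 0 (n : Int) 1).map f)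
    = (PySem.List.pyRange 0 (n : Int) 1).map
        (fun i => f i ++ PySem.Str.join "" (rows.map (fun row => pvGet row i))) := by
  induction rows generalizing f with
  | nil => simp [PySem.Chars.join_nil, PySem.Str.join]
  | cons row rest ih =>
    rw [List.foldl_cons]
    have h1 : ((PySem.List.enumerate ((PySem.List.pyRange 0 (n : Int) 1).map f)).map
        (fun ic => ic.2 ++ (PySem.List.pyGet? row ic.1).getD ""))
        = (PySem.List.pyRange 0 (n : Int) 1).map (fun i => f i ++ pvGet row i) := by
      rw [PySem.List.enumerate_eq_map_pyRange _ ""]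
      simp only [PySem.List.len_eq, List.length_map, PySem.List.length_pyRange_one, List.map_map]
      apply List.map_congr_left
      intro j hj
      rw [PySem.List.mem_pyRange_one] at hj
      simp only [Int.sub_zero, Int.toNat_natCast] at *
      have := PySem.List.pyGetD_map_pyRange_of_nonneg f (n : Int) j "" hj.1 hj.2
      simp [Function.comp, this, pvGet]
    rw [h1, ih]
    apply List.map_congr_left
    intro j hj
    rw [List.map_cons, pv_join0_cons, String.append_assoc]

-- ===== VERDICT (by name: the statement is the Claim_ definition above) =====
theorem col_to_string_spec : Claim_equal_col_to_string := by
  intro board _dom _pre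
  unfold Spec_col_to_string col_to_string_alt
  have hrep : List.replicate board.length ""
      = (PySem.List.pyRange 0 (board.length : Int) 1).map (fun _ => "") := by
    rw [List.map_const', PySem.List.length_pyRange_one]
    simp
  rw [pvA_closed, hrep, pvB_inv]
  apply List.map_congr_left
  intro j _
  rw [String.empty_append]
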